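-- pv_equiv track=rewrite | github.com/ischap7/hawaiian-pronunciation | hawaii.py | hawaii_pronunciation
-- ===== SOURCE A (Python) =====
-- def hawaii_pronunciation(word):
--     pronunciation = ""
--     i = 0
--     while i < len(word):
--         char = word[i].lower()
--
--         if char in "aeiou":
--
--             if i + 1 < len(word) and word[i:i + 2] in ["ai", "ae", "ao", "au", "ei", "eu", "iu", "oi", "ou", "ui"]:
--                 pronunciation += word[i:i + 2] + "-"
--                 i += 2
--             elif i + 2 < len(word) and word[i:i + 3] in ["aia", "aie", "aio", "aiu", "eia", "eie", "eio", "eiu",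
--                                                          "oia", "oie", "oio", "oiu", "uia", "uie", "uio", "uiu"]:
--                 pronunciation += word[i:i + 3] + "-"
--                 i += 3
--             else:
--                 pronunciation += vowelRules(char, i, word) + "-"
--                 i += 1
--         else:
--             pronunciation += char
--             i += 1
--
--     return pronunciation[:-1]
--
-- def vowelRules(char, i, word):
--
--     if char == 'a':
--         return 'ah'
--     elif char == 'e':
--         return 'eh'
--     elif char == 'i':
--         return 'ee'
--     elif char == 'o':
--         return 'oh'
--     elif char == 'u':
--         return 'oo'
--     elif char == 'w':
--
--         if i == 0 or (i > 0 and word[i - 1].lower() in "ae"):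
--             return 'w'
--         elif i > 0 and word[i - 1].lower() in "iou":
--             return 'v'
--     return char
-- ===== SOURCE B (Python) =====
-- import re
--
-- _TOKEN = re.compile(r"ai|ae|ao|au|ei|eu|iu|oi|ou|ui|[aeiouAEIOU]|.", re.S)
-- _VOWEL_SOUND = {'a': 'ah', 'e': 'eh', 'i': 'ee', 'o': 'oh', 'u': 'oo'}
--
-- def hawaii_pronunciation(word):
--     pieces = []
--     for tok in _TOKEN.findall(word):
--         if len(tok) == 2:
--             pieces.append(tok + "-")
--         elif tok.lower() in _VOWEL_SOUND:
--             pieces.append(_VOWEL_SOUND[tok.lower()] + "-")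
--         else:
--             pieces.append(tok.lower())
--     return "".join(pieces)[:-1]
-- ===== Notes on version B (the rewrite author's own statement) =====
-- stated objective: idiomatic
-- what changed: Replaces the index-driven while loop that grows the result by repeated string concatenation with a one-pass tokenizer (regex alternation: diphthong | single vowel | any char) whose tokens are mapped through a lookup table and joined once, then the trailing character is sliced off as in A.
import Mathlib
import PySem

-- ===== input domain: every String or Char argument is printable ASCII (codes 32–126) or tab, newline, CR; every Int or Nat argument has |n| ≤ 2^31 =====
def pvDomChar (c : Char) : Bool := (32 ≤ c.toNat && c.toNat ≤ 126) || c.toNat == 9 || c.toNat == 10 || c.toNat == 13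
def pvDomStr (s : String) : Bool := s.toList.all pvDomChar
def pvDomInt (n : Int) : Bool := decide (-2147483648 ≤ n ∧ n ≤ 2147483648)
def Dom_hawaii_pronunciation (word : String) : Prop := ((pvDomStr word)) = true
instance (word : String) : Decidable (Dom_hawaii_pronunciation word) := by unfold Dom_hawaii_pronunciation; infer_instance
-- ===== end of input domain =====

-- B replaces A's index-driven while loop by a one-pass tokenizer (regex alternation: diphthong | single char)
-- whose tokens are mapped through a lookup table and joined; same output, no speed claim (objective: idiomatic).

-- ===== PORT A =====

-- the ten two-letter diphthongs (lowercase, matched case-sensitively, as in A)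
def hpDiph2 : List (List Char) :=
  [['a','i'],['a','e'],['a','o'],['a','u'],['e','i'],['e','u'],['i','u'],['o','i'],['o','u'],['u','i']]

-- the sixteen three-letter sequences of A's (unreachable) second branch
def hpDiph3 : List (List Char) :=
  [['a','i','a'],['a','i','e'],['a','i','o'],['a','i','u'],
   ['e','i','a'],['e','i','e'],['e','i','o'],['e','i','u'],
   ['o','i','a'],['o','i','e'],['o','i','o'],['o','i','u'],
   ['u','i','a'],['u','i','e'],['u','i','o'],['u','i','u']]

-- vowelRules(char, i, word); word[i-1] is only reached with 0 < i, ported with pyGetD (exact there)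
def hpVowelRules (char : Char) (i : Nat) (word : List Char) : List Char :=
  if char = 'a' then ['a','h']
  else if char = 'e' then ['e','h']
  else if char = 'i' then ['e','e']
  else if char = 'o' then ['o','h']
  else if char = 'u' then ['o','o']
  else if char = 'w' then
    if i = 0 ∨ (0 < i ∧ PySem.Chars.lowerChar (PySem.List.pyGetD word ((i : Int) - 1) ' ') ∈ ['a','e']) then ['w']
    else if 0 < i ∧ PySem.Chars.lowerChar (PySem.List.pyGetD word ((i : Int) - 1) ' ') ∈ ['i','o','u'] then ['v']
    else [char]
  else [char]

-- the while loop of A, appending to the pronunciation; i is the Python index (always 0 ≤ i)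
def hpLoopA (word : List Char) (i : Nat) : List Char :=
  if h : i < word.length then
    let char := PySem.Chars.lowerChar word[i]
    if char ∈ ['a','e','i','o','u'] then
      if i + 1 < word.length ∧ PySem.List.slice word (some (i : Int)) (some ((i : Int) + 2)) ∈ hpDiph2 then
        PySem.List.slice word (some (i : Int)) (some ((i : Int) + 2)) ++ '-' :: hpLoopA word (i + 2)
      else if i + 2 < word.length ∧ PySem.List.slice word (some (i : Int)) (some ((i : Int) + 3)) ∈ hpDiph3 then
        PySem.List.slice word (some (i : Int)) (some ((i : Int) + 3)) ++ '-' :: hpLoopA word (i + 3)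
      else hpVowelRules char i word ++ '-' :: hpLoopA word (i + 1)
    else char :: hpLoopA word (i + 1)
  else []
termination_by word.length - i

def hawaii_pronunciation (word : String) : String :=
  String.ofList (PySem.List.slice (hpLoopA word.toList 0) none (some (-1)))

-- ===== PORT B =====

-- _VOWEL_SOUND as an insertion-ordered dict keyed by one-char strings
def hpVowelSound : PySem.Dict (List Char) (List Char) :=
  PySem.Dict.mk [(['a'],['a','h']),(['e'],['e','h']),(['i'],['e','e']),(['o'],['o','h']),(['u'],['o','o'])]

-- _TOKEN.findall: the regex tries the ten diphthongs first, else matches exactly one char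
def hpTokenize : List Char → List (List Char)
  | c1 :: c2 :: rest =>
      if [c1, c2] ∈ hpDiph2 then [c1, c2] :: hpTokenize rest
      else [c1] :: hpTokenize (c2 :: rest)
  | [c] => [[c]]
  | [] => []

-- the body of B's for loop: one token to its piece
def hpRender (t : List Char) : List Char :=
  if t.length = 2 then t ++ ['-']
  else
    match PySem.Dict.get? hpVowelSound (PySem.Chars.lower t) with
    | some v => v ++ ['-']
    | none => PySem.Chars.lower t

-- "".join(pieces) is concatenation, i.e. flatten
def hawaii_pronunciation_alt (word : String) : String :=
  String.ofList (PySem.List.slice (((hpTokenize word.toList).map hpRender).flatten) none (some (-1)))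

-- ===== PRECONDITION & SPEC =====
def Spec_hawaii_pronunciation (word : String) (out : String) : Prop := out = hawaii_pronunciation_alt word
instance (word : String) (out : String) : Decidable (Spec_hawaii_pronunciation word out) := by unfold Spec_hawaii_pronunciation; infer_instance

-- ===== CLAIM (what is proved, stated in full; the proofs are below) =====
def Claim_equal_hawaii_pronunciation : Prop := ∀ (word : String), Dom_hawaii_pronunciation word → Spec_hawaii_pronunciation word (hawaii_pronunciation word)

lemma hpDrop_cons {l : List Char} {i : Nat} (h : i < l.length) :
    l.drop i = l[i] :: l.drop (i + 1) := (List.getElem_cons_drop h).symm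

lemma hpSlice2_eq (word : List Char) (i : Nat) :
    PySem.List.slice word (some (i : Int)) (some ((i : Int) + 2)) = (word.drop i).take 2 := by
  have h : ((i : Int) + 2) = ((i + 2 : Nat) : Int) := by push_cast; ring
  rw [h, PySem.List.slice_natCast]; simp

lemma hpSlice3_eq (word : List Char) (i : Nat) :
    PySem.List.slice word (some (i : Int)) (some ((i : Int) + 3)) = (word.drop i).take 3 := by
  have h : ((i : Int) + 3) = ((i + 3 : Nat) : Int) := by push_cast; ring
  rw [h, PySem.List.slice_natCast]; simp

lemma hpDiph3_take {t : List Char} (ht : t ∈ hpDiph3) : t.take 2 ∈ hpDiph2 := by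
  fin_cases ht <;> decide

lemma hpDiph2_head {c1 c2 : Char} (h : [c1, c2] ∈ hpDiph2) :
    PySem.Chars.lowerChar c1 ∈ ['a', 'e', 'i', 'o', 'u'] := by
  fin_cases h <;> decide

lemma hpRender_vowel (c : Char) (i : Nat) (word : List Char)
    (hv : PySem.Chars.lowerChar c ∈ ['a', 'e', 'i', 'o', 'u']) :
    hpRender [c] = hpVowelRules (PySem.Chars.lowerChar c) i word ++ ['-'] := by
  simp only [List.mem_cons, List.not_mem_nil, or_false] at hv
  rcases hv with h | h | h | h | h <;>
    simp [hpRender, hpVowelRules, hpVowelSound, PySem.Chars.lower, h, PySem.Dict.get?]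
lemma hpRender_nonvowel (c : Char) (hv : PySem.Chars.lowerChar c ∉ ['a', 'e', 'i', 'o', 'u']) :
    hpRender [c] = [PySem.Chars.lowerChar c] := by
  simp only [List.mem_cons, List.not_mem_nil, or_false, not_or] at hv
  obtain ⟨h1, h2, h3, h4, h5⟩ := hv
  have b1 : ('a' == PySem.Chars.lowerChar c) = false := by simp [Ne.symm h1]
  have b2 : ('e' == PySem.Chars.lowerChar c) = false := by simp [Ne.symm h2]
  have b3 : ('i' == PySem.Chars.lowerChar c) = false := by simp [Ne.symm h3]
  have b4 : ('o' == PySem.Chars.lowerChar c) = false := by simp [Ne.symm h4]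
  have b5 : ('u' == PySem.Chars.lowerChar c) = false := by simp [Ne.symm h5]
  simp [hpRender, hpVowelSound, PySem.Chars.lower, PySem.Dict.get?, List.find?,
        b1, b2, b3, b4, b5]

lemma hpTokenize_step (word : List Char) (i : Nat) (h : i < word.length)
    (hnd : ¬ ((word.drop i).take 2 ∈ hpDiph2 ∧ i + 1 < word.length)) :
    hpTokenize (word.drop i) = [word[i]] :: hpTokenize (word.drop (i + 1)) := by
  by_cases h1 : i + 1 < word.length
  · rw [hpDrop_cons h, hpDrop_cons h1, hpTokenize]
    rw [hpDrop_cons h, hpDrop_cons h1] at hnd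
    simp only [List.take_succ_cons, List.take_zero] at hnd
    simp only [if_neg (fun hc => hnd ⟨hc, h1⟩)]
  · have : word.drop (i + 1) = [] := List.drop_eq_nil_of_le (by omega)
    rw [hpDrop_cons h, this]
    simp [hpTokenize]
lemma hpLoopA_eq_tokens (word : List Char) (i : Nat) :
    hpLoopA word i = ((hpTokenize (word.drop i)).map hpRender).flatten := by
  fun_induction hpLoopA word i with
  | case1 i hlt ch hv h2 ih =>
    obtain ⟨h1, hd2⟩ := h2
    rw [hpSlice2_eq] at hd2 ⊢
    have ht2 : (word.drop i).take 2 = [word[i], word[i + 1]] := by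
      rw [hpDrop_cons hlt, hpDrop_cons h1]; rfl
    rw [ht2] at hd2 ⊢
    rw [hpDrop_cons hlt, hpDrop_cons h1, hpTokenize, if_pos hd2]
    simp only [List.map_cons, List.flatten_cons, ih, hpRender]
    simp
  | case2 i hlt ch hv h2 h3 ih =>
    exfalso
    obtain ⟨h1, hd3⟩ := h3
    rw [hpSlice3_eq] at hd3
    apply h2
    refine ⟨by omega, ?_⟩
    rw [hpSlice2_eq]
    have := hpDiph3_take hd3
    simpa [List.take_take] using this
  | case3 i hlt ch hv h2 h3 ih =>
    rw [hpTokenize_step word i hlt (by rw [hpSlice2_eq] at h2; tauto)]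
    simp only [List.map_cons, List.flatten_cons, ih, hpRender_vowel word[i] i word hv]
    simp
    rfl
  | case4 i hlt ch hv ih =>
    have hnd : ¬ ((word.drop i).take 2 ∈ hpDiph2 ∧ i + 1 < word.length) := by
      rintro ⟨hm, h1⟩
      have ht2 : (word.drop i).take 2 = [word[i], word[i + 1]] := by
        rw [hpDrop_cons hlt, hpDrop_cons h1]; rfl
      rw [ht2] at hm
      exact hv (hpDiph2_head hm)
    rw [hpTokenize_step word i hlt hnd]
    simp only [List.map_cons, List.flatten_cons, ih, hpRender_nonvowel word[i] hv]
    rfl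
  | case5 i hlt =>
    have hnil : word.drop i = [] := List.drop_eq_nil_of_le (by omega)
    simp [hnil, hpTokenize]

-- ===== VERDICT (by name: the statement is the Claim_ definition above) =====
theorem hawaii_pronunciation_spec : Claim_equal_hawaii_pronunciation := by
  intro word _
  unfold Spec_hawaii_pronunciation hawaii_pronunciation hawaii_pronunciation_alt
  rw [hpLoopA_eq_tokens word.toList 0, List.drop_zero]
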